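-- pv_equiv track=rewrite | github.com/chamrun/aut-algorithm-design | hw3/hw3-quera/one.py | find_least_palindrome_deletion
-- ===== SOURCE A (Python) =====
-- def find_least_palindrome_deletion(word: str) -> int:
--     dp_size = len(word) + 1
--     dp = [[0 for _ in range(dp_size)] for _ in range(dp_size)]
--
--     for column in range(len(word)):
--         row = column
--         dp[row][column] = 1
--
--     for curr_column in range(1, len(word)):
--         row = 0
--
--         for column in range(curr_column, len(word)):
--             dp[row][column] = dp[row + 1][column] + 1
--
--             if word[row] == word[row + 1]:
--                 dp[row][column] = min(dp[row + 2][column] + 1, dp[row][column])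
--
--             for occurrence in range(row + 2, column + 1):
--                 if word[row] == word[occurrence]:
--                     dp[row][column] = min(dp[row + 1][occurrence - 1] + dp[occurrence + 1][column], dp[row][column])
--
--             row += 1
--
--     return dp[0][-2]
-- ===== SOURCE B (Python) =====
-- from functools import lru_cache
--
-- def find_least_palindrome_deletion(word: str) -> int:
--     @lru_cache(maxsize=None)
--     def solve(i, j):
--         if i > j:
--             return 0
--         if i == j:
--             return 1
--         best = solve(i + 1, j) + 1
--         if word[i] == word[i + 1]:
--             best = min(solve(i + 2, j) + 1, best)
--         for k in range(i + 2, j + 1):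
--             if word[i] == word[k]:
--                 best = min(solve(i + 1, k - 1) + solve(k + 1, j), best)
--         return best
--     return solve(0, len(word) - 1)
-- ===== Notes on version B (the rewrite author's own statement) =====
-- stated objective: alternative
-- what changed: Replaces A's bottom-up triangular DP table (nested loops filling dp[row][column] by increasing gap) with a top-down lru_cache-memoized recursion solve(i, j) over the interval, computing only the cells actually reachable from (0, n-1).
-- outside the precondition, e.g. on find_least_palindrome_deletion(''): A raises IndexError, B returns 0
import Mathlib
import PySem

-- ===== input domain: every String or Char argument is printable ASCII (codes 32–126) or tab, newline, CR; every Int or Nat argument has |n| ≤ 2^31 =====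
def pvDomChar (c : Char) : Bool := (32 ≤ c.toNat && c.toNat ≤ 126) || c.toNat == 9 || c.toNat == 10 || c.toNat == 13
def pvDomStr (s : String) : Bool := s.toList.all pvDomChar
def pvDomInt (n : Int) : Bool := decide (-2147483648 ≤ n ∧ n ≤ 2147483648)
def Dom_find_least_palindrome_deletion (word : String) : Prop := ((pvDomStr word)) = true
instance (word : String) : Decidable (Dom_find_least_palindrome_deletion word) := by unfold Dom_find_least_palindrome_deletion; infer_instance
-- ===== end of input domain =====

-- B replaces A's bottom-up triangular table by a top-down memoized recursion over the interval (same recurrence,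
-- different decomposition); objective: alternative.

-- ===== PORT A =====
-- word[i] (every access both programs make inside Pre_ is in range)
def pvChar (w : List Char) (i : Int) : Char := (PySem.List.pyGet? w i).getD ' '

-- dp[r][c] = v on a 2-D table modeled as a total function (unwritten entries stay 0, like A's zero-initialised matrix)
def pvUpd (dp : Int → Int → Int) (r c v : Int) : Int → Int → Int :=
  fun r' c' => if r' = r ∧ c' = c then v else dp r' c'

-- body of `for column in range(len(word)): dp[column][column] = 1`
def pvDiagStep (dp : Int → Int → Int) (column : Int) : Int → Int → Int := pvUpd dp column column 1

-- body of the inner `for column in range(curr_column, len(word))` loop; state = (dp, row)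
def pvColStep (w : List Char) (st : (Int → Int → Int) × Int) (column : Int) : (Int → Int → Int) × Int :=
  let dp := st.1
  let row := st.2
  let v0 := dp (row + 1) column + 1
  let v1 := if pvChar w row = pvChar w (row + 1) then min (dp (row + 2) column + 1) v0 else v0
  let v2 := (PySem.List.pyRange (row + 2) (column + 1) 1).foldl (fun v occ =>
        if pvChar w row = pvChar w occ then min (dp (row + 1) (occ - 1) + dp (occ + 1) column) v else v) v1
  (pvUpd dp row column v2, row + 1)

-- body of the outer `for curr_column in range(1, len(word))` loop: `row = 0`, then the inner loop
def pvOuterStep (w : List Char) (n : Int) (dp : Int → Int → Int) (currColumn : Int) : Int → Int → Int :=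
  ((PySem.List.pyRange currColumn n 1).foldl (pvColStep w) (dp, (0 : Int))).1

def find_least_palindrome_deletion (word : String) : Int :=
  let w := word.toList
  let n : Int := (w.length : Int)
  let dp1 := (PySem.List.pyRange 0 n 1).foldl pvDiagStep (fun _ _ => 0)
  let dp2 := (PySem.List.pyRange 1 n 1).foldl (pvOuterStep w n) dp1
  -- dp[0][-2]: index -2 into a row of length n+1 is n-1 (n ≥ 1 by Pre_; on "" Python raises IndexError)
  dp2 0 (n - 1)

-- ===== PORT B =====
-- solve(i, j) of Source B; lru_cache only caches, so the port is the plain recursion. Fuel: every call strictly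
-- shrinks the interval, so fuel = len(word) covers the top-level call solve(0, n-1).
def pvSolve (w : List Char) : Nat → Int → Int → Int
  | 0, _, _ => 0
  | f + 1, i, j =>
    if i > j then 0
    else if i = j then 1
    else
      let b0 := pvSolve w f (i + 1) j + 1
      let b1 := if pvChar w i = pvChar w (i + 1) then min (pvSolve w f (i + 2) j + 1) b0 else b0
      (PySem.List.pyRange (i + 2) (j + 1) 1).foldl (fun best k =>
          if pvChar w i = pvChar w k then min (pvSolve w f (i + 1) (k - 1) + pvSolve w f (k + 1) j) best else best) b1

def find_least_palindrome_deletion_alt (word : String) : Int :=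
  let w := word.toList
  pvSolve w w.length 0 ((w.length : Int) - 1)

-- ===== PRECONDITION & SPEC =====
-- Pre_ excludes only the empty string, on which A raises IndexError (dp[0][-2] on a length-1 row).
def Pre_find_least_palindrome_deletion (word : String) : Prop := word.toList ≠ []
instance (word : String) : Decidable (Pre_find_least_palindrome_deletion word) := by unfold Pre_find_least_palindrome_deletion; infer_instance
def pvWitness_find_least_palindrome_deletion : String := "abcba"

def Spec_find_least_palindrome_deletion (word : String) (out : Int) : Prop := out = find_least_palindrome_deletion_alt word
instance (word : String) (out : Int) : Decidable (Spec_find_least_palindrome_deletion word out) := by unfold Spec_find_least_palindrome_deletion; infer_instance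

-- ===== CLAIM (what is proved, stated in full; the proofs are below) =====
def Claim_equal_find_least_palindrome_deletion : Prop := ∀ (word : String), Dom_find_least_palindrome_deletion word → Pre_find_least_palindrome_deletion word → Spec_find_least_palindrome_deletion word (find_least_palindrome_deletion word)

-- ===== LEMMAS AND PROOFS =====

-- i > j ⇒ 0, at every fuel
lemma pvSolve_gt (w : List Char) (f : Nat) {i j : Int} (h : i > j) : pvSolve w f i j = 0 := by
  cases f <;> simp [pvSolve, h]

lemma pvSolve_diag (w : List Char) (f : Nat) (i : Int) : pvSolve w (f + 1) i i = 1 := by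
  simp [pvSolve]

-- fuel irrelevance: any fuel covering the interval gives the same value
lemma pvSolve_fuel (w : List Char) : ∀ f g : Nat, ∀ i j : Int, (j - i).toNat < f → (j - i).toNat < g →
    pvSolve w f i j = pvSolve w g i j := by
  intro f
  induction f with
  | zero => intro g i j hf _; omega
  | succ f ih =>
    intro g i j hf hg
    cases g with
    | zero => omega
    | succ g =>
      by_cases h1 : i > j
      · rw [pvSolve_gt w _ h1, pvSolve_gt w _ h1]
      · by_cases h2 : i = j
        · subst h2; rw [pvSolve_diag, pvSolve_diag]
        · have hij : i < j := by omega
          simp only [pvSolve, if_neg h1, if_neg h2]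
          rw [ih g (i + 1) j (by omega) (by omega), ih g (i + 2) j (by omega) (by omega)]
          refine PySem.List.foldl_congr_mem _ _ _ _ ?_
          intro acc k hk
          rw [PySem.List.mem_pyRange_one] at hk
          by_cases hc : pvChar w i = pvChar w k
          · rw [if_pos hc, if_pos hc,
              ih g (i + 1) (k - 1) (by omega) (by omega), ih g (k + 1) j (by omega) (by omega)]
          · rw [if_neg hc, if_neg hc]

-- the recursion at full fuel (the value B returns on the interval [i, j])
def pvF (w : List Char) (i j : Int) : Int := pvSolve w w.length i j

lemma pvF_gt (w : List Char) {i j : Int} (h : i > j) : pvF w i j = 0 := pvSolve_gt w _ h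

-- the diagonal pass writes 1 on dp[c][c] for 0 ≤ c < m
lemma pvDiag (m : Nat) : ∀ r c : Int,
    ((PySem.List.pyRange 0 (m : Int) 1).foldl pvDiagStep (fun _ _ => 0)) r c
      = if r = c ∧ 0 ≤ r ∧ r < (m : Int) then 1 else 0 := by
  induction m with
  | zero =>
    intro r c
    rw [PySem.List.pyRange_one_eq_nil (by omega)]
    simp only [List.foldl_nil]
    rw [if_neg (by omega)]
  | succ m ih =>
    intro r c
    have hcast : ((m + 1 : Nat) : Int) = (m : Int) + 1 := by push_cast; ring
    rw [hcast, PySem.List.pyRange_one_succ_right (by omega), List.foldl_append, List.foldl_cons,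
      List.foldl_nil]
    simp only [pvDiagStep, pvUpd]
    by_cases h : r = (m : Int) ∧ c = (m : Int)
    · rw [if_pos h, if_pos (by omega)]
    · rw [if_neg h, ih r c]
      exact if_congr (by omega) rfl rfl

-- one cell of the inner loop: A's update formula, evaluated on a table that already agrees with pvF on all
-- strictly shorter intervals, produces exactly pvF on the current interval [r, c] of gap m
lemma pvStep (w : List Char) (dp : Int → Int → Int) (m r c : Int)
    (hm : 1 ≤ m) (hr : 0 ≤ r) (hc : c < (w.length : Int)) (hg : c - r = m)
    (H : ∀ r' c', (c' < r' ∨ (0 ≤ r' ∧ c' < (w.length : Int) ∧ c' - r' < m)) → dp r' c' = pvF w r' c') :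
    ((PySem.List.pyRange (r + 2) (c + 1) 1).foldl (fun v occ =>
        if pvChar w r = pvChar w occ then min (dp (r + 1) (occ - 1) + dp (occ + 1) c) v else v)
      (if pvChar w r = pvChar w (r + 1)
        then min (dp (r + 2) c + 1) (dp (r + 1) c + 1) else dp (r + 1) c + 1))
      = pvF w r c := by
  have hmN : m < (w.length : Int) := by omega
  obtain ⟨f, hf⟩ : ∃ f, w.length = f + 1 := ⟨w.length - 1, by omega⟩
  have hfm : m ≤ (f : Int) := by omega
  have e1 : pvSolve w f (r + 1) c = dp (r + 1) c := by
    rw [pvSolve_fuel w f w.length (r + 1) c (by omega) (by omega)]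
    exact (H _ _ (Or.inr ⟨by omega, by omega, by omega⟩)).symm
  have e2 : pvSolve w f (r + 2) c = dp (r + 2) c := by
    by_cases h2 : r + 2 ≤ c
    · rw [pvSolve_fuel w f w.length (r + 2) c (by omega) (by omega)]
      exact (H _ _ (Or.inr ⟨by omega, by omega, by omega⟩)).symm
    · rw [pvSolve_gt w f (by omega), H _ _ (Or.inl (by omega)), pvF_gt w (by omega)]
  rw [show pvF w r c = pvSolve w (f + 1) r c by rw [pvF, hf]]
  simp only [pvSolve, if_neg (show ¬ r > c by omega), if_neg (show ¬ r = c by omega)]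
  rw [e1, e2]
  refine (PySem.List.foldl_congr_mem _ _ _ _ ?_).symm
  intro acc k hk
  rw [PySem.List.mem_pyRange_one] at hk
  by_cases hch : pvChar w r = pvChar w k
  · rw [if_pos hch, if_pos hch]
    have ea : pvSolve w f (r + 1) (k - 1) = dp (r + 1) (k - 1) := by
      rw [pvSolve_fuel w f w.length (r + 1) (k - 1) (by omega) (by omega)]
      exact (H _ _ (Or.inr ⟨by omega, by omega, by omega⟩)).symm
    have eb : pvSolve w f (k + 1) c = dp (k + 1) c := by
      by_cases h2 : k < c
      · rw [pvSolve_fuel w f w.length (k + 1) c (by omega) (by omega)]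
        exact (H _ _ (Or.inr ⟨by omega, by omega, by omega⟩)).symm
      · rw [pvSolve_gt w f (by omega), H _ _ (Or.inl (by omega)), pvF_gt w (by omega)]
    rw [ea, eb]
  · rw [if_neg hch, if_neg hch]

-- the inner loop: starting from a table correct on all gaps < m, after t columns the row counter is t and the
-- table is additionally correct on gap-m intervals ending before column m + t
lemma pvInner (w : List Char) (m : Nat) (hm : 1 ≤ m) (dp : Int → Int → Int)
    (hdp : ∀ r c, dp r c
      = if 0 ≤ r ∧ r ≤ c ∧ c < (w.length : Int) ∧ c - r < (m : Int) then pvF w r c else 0) :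
    ∀ t : Nat, m + t ≤ w.length →
      ((PySem.List.pyRange (m : Int) ((m : Int) + (t : Int)) 1).foldl (pvColStep w) (dp, (0 : Int))).2 = (t : Int) ∧
      ∀ r c, ((PySem.List.pyRange (m : Int) ((m : Int) + (t : Int)) 1).foldl (pvColStep w) (dp, (0 : Int))).1 r c
        = if 0 ≤ r ∧ r ≤ c ∧ c < (w.length : Int) ∧
              (c - r < (m : Int) ∨ (c - r = (m : Int) ∧ c < (m : Int) + (t : Int)))
            then pvF w r c else 0 := by
  intro t
  induction t with
  | zero =>
    intro _
    rw [show (m : Int) + ((0 : Nat) : Int) = (m : Int) by omega, PySem.List.pyRange_one_eq_nil (by omega)]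
    simp only [List.foldl_nil]
    refine ⟨rfl, fun r c => ?_⟩
    rw [hdp r c]
    exact if_congr (by omega) rfl rfl
  | succ t ih =>
    intro hlen
    obtain ⟨ih2, ih1⟩ := ih (by omega)
    have hcast : (m : Int) + ((t + 1 : Nat) : Int) = ((m : Int) + (t : Int)) + 1 := by push_cast; ring
    rw [hcast, PySem.List.pyRange_one_succ_right (by omega), List.foldl_append, List.foldl_cons,
      List.foldl_nil]
    set st := (PySem.List.pyRange (m : Int) ((m : Int) + (t : Int)) 1).foldl (pvColStep w) (dp, (0 : Int)) with hst
    have hv : (pvColStep w st ((m : Int) + (t : Int))).1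
          = pvUpd st.1 (t : Int) ((m : Int) + (t : Int)) (pvF w (t : Int) ((m : Int) + (t : Int)))
        ∧ (pvColStep w st ((m : Int) + (t : Int))).2 = ((t + 1 : Nat) : Int) := by
      have hH : ∀ r' c', (c' < r' ∨ (0 ≤ r' ∧ c' < (w.length : Int) ∧ c' - r' < (m : Int))) →
          st.1 r' c' = pvF w r' c' := by
        intro r' c' h
        rcases h with h | h
        · rw [ih1 r' c', if_neg (by omega), pvF_gt w (by omega)]
        · by_cases hle : r' ≤ c'
          · rw [ih1 r' c', if_pos (by omega)]
          · rw [ih1 r' c', if_neg (by omega), pvF_gt w (by omega)]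
      have hs := pvStep w st.1 (m : Int) (t : Int) ((m : Int) + (t : Int))
        (by omega) (by omega) (by omega) (by omega) hH
      constructor
      · simp only [pvColStep, ih2]
        rw [hs]
      · simp only [pvColStep, ih2]
        push_cast; ring
    refine ⟨hv.2, fun r c => ?_⟩
    rw [hv.1]
    simp only [pvUpd]
    by_cases h : r = (t : Int) ∧ c = (m : Int) + (t : Int)
    · rw [if_pos h, h.1, h.2, if_pos (by omega)]
    · rw [if_neg h, ih1 r c]
      exact if_congr (by omega) rfl rfl

-- the outer loop: after curr_column has run through 1 .. m-1 the table agrees with pvF on every interval of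
-- gap < m (1 ≤ m ≤ len)
lemma pvOuter (w : List Char) : ∀ m : Nat, 1 ≤ m → m ≤ w.length →
    ∀ r c, ((PySem.List.pyRange 1 (m : Int) 1).foldl (pvOuterStep w (w.length : Int))
        ((PySem.List.pyRange 0 (w.length : Int) 1).foldl pvDiagStep (fun _ _ => 0))) r c
      = if 0 ≤ r ∧ r ≤ c ∧ c < (w.length : Int) ∧ c - r < (m : Int) then pvF w r c else 0 := by
  intro m
  induction m with
  | zero => omega
  | succ m ih =>
    intro _ hlen r c
    by_cases hm : 1 ≤ m
    · have hcast : ((m + 1 : Nat) : Int) = (m : Int) + 1 := by push_cast; ring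
      rw [hcast, PySem.List.pyRange_one_succ_right (by omega), List.foldl_append, List.foldl_cons,
        List.foldl_nil]
      have hinner := pvInner w m hm _ (fun r c => ih hm (by omega) r c) (w.length - m) (by omega)
      have hn : (w.length : Int) = (m : Int) + ((w.length - m : Nat) : Int) := by
        push_cast [Nat.cast_sub (by omega : m ≤ w.length)]; ring
      rw [← hn] at hinner
      simp only [pvOuterStep]
      rw [hinner.2 r c]
      have hsub : ((w.length - m : Nat) : Int) = (w.length : Int) - (m : Int) := by
        push_cast [Nat.cast_sub (by omega : m ≤ w.length)]; ring
      refine if_congr ?_ rfl rfl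
      omega
    · -- m = 0: range(1, 1) is empty, the table is the diagonal one; gap < 1 means r = c
      have hm0 : m = 0 := by omega
      subst hm0
      rw [show ((0 + 1 : Nat) : Int) = 1 by norm_num,
        show PySem.List.pyRange 1 1 1 = [] from PySem.List.pyRange_one_eq_nil (by omega)]
      simp only [List.foldl_nil]
      rw [pvDiag w.length r c]
      by_cases h : r = c ∧ 0 ≤ r ∧ r < (w.length : Int)
      · rw [if_pos h, if_pos (by omega)]
        obtain ⟨f, hf⟩ : ∃ f, w.length = f + 1 := ⟨w.length - 1, by omega⟩
        rw [pvF, hf, h.1, pvSolve_diag]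
      · rw [if_neg h, if_neg (by omega)]

-- ===== VERDICT (by name: the statement is the Claim_ definition above) =====
theorem find_least_palindrome_deletion_spec : Claim_equal_find_least_palindrome_deletion := by
  intro word _ hpre
  unfold Spec_find_least_palindrome_deletion
  have hlen : 1 ≤ word.toList.length := by
    cases h : word.toList with
    | nil => exact absurd h hpre
    | cons a l => simp
  simp only [find_least_palindrome_deletion, find_least_palindrome_deletion_alt]
  rw [pvOuter word.toList word.toList.length hlen le_rfl 0 ((word.toList.length : Int) - 1),
    if_pos (by omega)]
  rfl
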